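-- pv_equiv track=rewrite | github.com/edfornieles/sages | characters/literary_text_processor.py | _identify_knowledge_domains
-- ===== SOURCE A (Python) =====
-- from typing import Dict, List, Any, Optional
--
-- def _identify_knowledge_domains(themes: Optional[str], author: Optional[str]) -> List[str]:
--     """Identify knowledge domains from themes and author."""
--     domains = ["General knowledge from uploaded texts"]
--
--     if themes:
--         # Extract potential domains from themes
--         theme_words = themes.lower().split()
--         if any(word in theme_words for word in ["psychology", "mind", "behavior"]):
--             domains.append("Psychology and mental processes")
--         if any(word in theme_words for word in ["philosophy", "wisdom", "ethics"]):
--             domains.append("Philosophy and ethics")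
--         if any(word in theme_words for word in ["art", "beauty", "creative"]):
--             domains.append("Art and creativity")
--         if any(word in theme_words for word in ["science", "nature", "discovery"]):
--             domains.append("Science and natural philosophy")
--
--     if author:
--         author_lower = author.lower()
--         if "freud" in author_lower:
--             domains.append("Psychoanalytic theory and practice")
--         elif "shakespeare" in author_lower:
--             domains.append("Drama, human nature, and poetic expression")
--         elif any(name in author_lower for name in ["plato", "aristotle", "socrates"]):
--             domains.append("Ancient philosophy and dialectical reasoning")
--
--     return domains
-- ===== SOURCE B (Python) =====
-- from typing import List, Optional
--
-- # Inverted traversal: instead of testing each keyword group against the words,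
-- # scan the input words once through a keyword->label index, collect the set of
-- # hit labels, and emit them in canonical order.  The author is matched by an
-- # exhaustive scan of a flat (keyword, priority) list; the minimum priority
-- # found selects the label (equivalent to the elif chain since priorities
-- # follow the chain order).
-- KEYWORD_TO_LABEL = {
--     "psychology": "Psychology and mental processes",
--     "mind": "Psychology and mental processes",
--     "behavior": "Psychology and mental processes",
--     "philosophy": "Philosophy and ethics",
--     "wisdom": "Philosophy and ethics",
--     "ethics": "Philosophy and ethics",
--     "art": "Art and creativity",
--     "beauty": "Art and creativity",
--     "creative": "Art and creativity",
--     "science": "Science and natural philosophy",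
--     "nature": "Science and natural philosophy",
--     "discovery": "Science and natural philosophy",
-- }
-- THEME_LABEL_ORDER = [
--     "Psychology and mental processes",
--     "Philosophy and ethics",
--     "Art and creativity",
--     "Science and natural philosophy",
-- ]
-- AUTHOR_KEYWORDS = [
--     ("freud", 0),
--     ("shakespeare", 1),
--     ("plato", 2),
--     ("aristotle", 2),
--     ("socrates", 2),
-- ]
-- AUTHOR_LABELS = [
--     "Psychoanalytic theory and practice",
--     "Drama, human nature, and poetic expression",
--     "Ancient philosophy and dialectical reasoning",
-- ]
--
-- def _identify_knowledge_domains(themes: Optional[str], author: Optional[str]) -> List[str]: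
--     domains = ["General knowledge from uploaded texts"]
--     if themes:
--         hits = set()
--         for w in themes.lower().split():
--             if w in KEYWORD_TO_LABEL:
--                 hits.add(KEYWORD_TO_LABEL[w])
--         domains.extend(lbl for lbl in THEME_LABEL_ORDER if lbl in hits)
--     if author:
--         al = author.lower()
--         ranks = [r for kw, r in AUTHOR_KEYWORDS if kw in al]
--         if ranks:
--             domains.append(AUTHOR_LABELS[min(ranks)])
--     return domains
-- ===== Notes on version B (the rewrite author's own statement) =====
-- stated objective: alternative
-- what changed: Themes are now matched by a single pass over the input words through a keyword-to-label hash index collecting a set of hit labels (emitted in canonical order), so the per-group any-scans disappear; the author elif chain becomes an exhaustive scan of a flat (keyword, priority) list whose minimum priority selects the label.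
import Mathlib
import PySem

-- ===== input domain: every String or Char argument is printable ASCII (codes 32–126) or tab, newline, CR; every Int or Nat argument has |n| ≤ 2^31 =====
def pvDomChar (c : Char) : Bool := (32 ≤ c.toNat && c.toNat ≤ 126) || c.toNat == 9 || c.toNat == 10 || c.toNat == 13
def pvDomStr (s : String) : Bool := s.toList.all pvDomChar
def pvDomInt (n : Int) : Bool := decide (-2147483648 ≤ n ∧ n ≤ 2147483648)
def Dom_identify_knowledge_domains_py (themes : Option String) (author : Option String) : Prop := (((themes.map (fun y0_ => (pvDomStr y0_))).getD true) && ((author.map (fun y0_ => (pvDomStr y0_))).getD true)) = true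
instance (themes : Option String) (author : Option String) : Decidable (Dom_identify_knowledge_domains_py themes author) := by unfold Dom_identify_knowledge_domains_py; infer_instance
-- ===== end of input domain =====

-- B inverts the traversal: the input words are scanned once through a
-- keyword->label index collecting the set of hit labels (emitted in canonical
-- order), and the author elif chain becomes an exhaustive flat keyword scan
-- whose minimum priority selects the label. Objective: alternative.

-- ===== PORT A =====
-- A-side helpers: the theme-check block and the author if/elif chain of the
-- Python body, as written (branch order and conditions unchanged).
def pvA_theme (domains : List String) (theme_words : List String) : List String :=
  let domains := if ["psychology", "mind", "behavior"].any (fun w => theme_words.contains w)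
    then domains ++ ["Psychology and mental processes"] else domains
  let domains := if ["philosophy", "wisdom", "ethics"].any (fun w => theme_words.contains w)
    then domains ++ ["Philosophy and ethics"] else domains
  let domains := if ["art", "beauty", "creative"].any (fun w => theme_words.contains w)
    then domains ++ ["Art and creativity"] else domains
  let domains := if ["science", "nature", "discovery"].any (fun w => theme_words.contains w)
    then domains ++ ["Science and natural philosophy"] else domains
  domains

def pvA_author (domains : List String) (author_lower : String) : List String :=
  if PySem.Str.isIn "freud" author_lower then domains ++ ["Psychoanalytic theory and practice"]
  else if PySem.Str.isIn "shakespeare" author_lower then domains ++ ["Drama, human nature, and poetic expression"]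
  else if ["plato", "aristotle", "socrates"].any (fun n => PySem.Str.isIn n author_lower)
    then domains ++ ["Ancient philosophy and dialectical reasoning"]
  else domains

def identify_knowledge_domains_py (themes : Option String) (author : Option String) : List String :=
  let domains := ["General knowledge from uploaded texts"]
  let domains :=
    match themes with
    | none => domains
    | some t =>
      if t = "" then domains
      else pvA_theme domains (PySem.Str.split₀ (PySem.Str.lower t))
  match author with
  | none => domains
  | some a =>
    if a = "" then domains
    else pvA_author domains (PySem.Str.lower a)

-- ===== PORT B =====
-- B-side helpers: the keyword->label index, the canonical label order, the
-- flat author keyword list, and Source B's word-scan / min-priority lookup.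
def pvKeywordToLabel : PySem.Dict String String := PySem.Dict.ofList
  [("psychology", "Psychology and mental processes"),
   ("mind", "Psychology and mental processes"),
   ("behavior", "Psychology and mental processes"),
   ("philosophy", "Philosophy and ethics"),
   ("wisdom", "Philosophy and ethics"),
   ("ethics", "Philosophy and ethics"),
   ("art", "Art and creativity"),
   ("beauty", "Art and creativity"),
   ("creative", "Art and creativity"),
   ("science", "Science and natural philosophy"),
   ("nature", "Science and natural philosophy"),
   ("discovery", "Science and natural philosophy")]

def pvThemeLabelOrder : List String :=
  ["Psychology and mental processes",
   "Philosophy and ethics",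
   "Art and creativity",
   "Science and natural philosophy"]

def pvAuthorKeywords : List (String × Int) :=
  [("freud", 0), ("shakespeare", 1), ("plato", 2), ("aristotle", 2), ("socrates", 2)]

def pvAuthorLabels : List String :=
  ["Psychoanalytic theory and practice",
   "Drama, human nature, and poetic expression",
   "Ancient philosophy and dialectical reasoning"]

-- the 'for w in words: if w in KEYWORD_TO_LABEL: hits.add(...)' loop
def pvB_hits (words : List String) : PySem.Set String :=
  words.foldl (fun s w =>
    match pvKeywordToLabel.get? w with
    | some l => PySem.Set.add s l
    | none => s) PySem.Set.empty

def pvB_theme (domains : List String) (words : List String) : List String :=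
  let hits := pvB_hits words
  domains ++ pvThemeLabelOrder.filter (fun l => PySem.Set.contains hits l)

def pvB_author (domains : List String) (al : String) : List String :=
  let ranks := (pvAuthorKeywords.filter (fun p => PySem.Str.isIn p.1 al)).map Prod.snd
  match PySem.List.min? ranks (fun r => r) with
  | some m => domains ++ [(PySem.List.pyGet? pvAuthorLabels m).getD ""]  -- index always in range (ranks ⊆ {0,1,2})
  | none => domains

def identify_knowledge_domains_py_alt (themes : Option String) (author : Option String) : List String :=
  let domains := ["General knowledge from uploaded texts"]
  let domains :=
    match themes with
    | none => domains
    | some t =>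
      if t = "" then domains
      else pvB_theme domains (PySem.Str.split₀ (PySem.Str.lower t))
  match author with
  | none => domains
  | some a =>
    if a = "" then domains
    else pvB_author domains (PySem.Str.lower a)

-- ===== PRECONDITION & SPEC =====
def Spec_identify_knowledge_domains_py (themes : Option String) (author : Option String) (out : List String) : Prop := out = identify_knowledge_domains_py_alt themes author
instance (themes : Option String) (author : Option String) (out : List String) : Decidable (Spec_identify_knowledge_domains_py themes author out) := by unfold Spec_identify_knowledge_domains_py; infer_instance

-- ===== CLAIM =====
def Claim_equal_identify_knowledge_domains_py : Prop := ∀ (themes : Option String) (author : Option String), Dom_identify_knowledge_domains_py themes author → Spec_identify_knowledge_domains_py themes author (identify_knowledge_domains_py themes author)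

-- ===== LEMMAS AND PROOFS =====

-- membership in the hits-fold, from any accumulator
theorem pv_mem_hits_aux (tw : List String) (s : PySem.Set String) (l : String) :
    l ∈ tw.foldl (fun s w =>
      match pvKeywordToLabel.get? w with
      | some l' => PySem.Set.add s l'
      | none => s) s ↔ l ∈ s ∨ ∃ w ∈ tw, pvKeywordToLabel.get? w = some l := by
  induction tw generalizing s with
  | nil => simp
  | cons w tw ih =>
    simp only [List.foldl_cons]
    cases h : pvKeywordToLabel.get? w with
    | none =>
      simp only [ih, List.mem_cons]
      constructor
      · rintro (hs | ⟨w', hw', hg⟩)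
        · exact Or.inl hs
        · exact Or.inr ⟨w', Or.inr hw', hg⟩
      · rintro (hs | ⟨w', (rfl | hw'), hg⟩)
        · exact Or.inl hs
        · rw [h] at hg; cases hg
        · exact Or.inr ⟨w', hw', hg⟩
    | some l' =>
      simp only [ih, PySem.Set.mem_add, List.mem_cons]
      constructor
      · rintro ((hs | rfl) | ⟨w', hw', hg⟩)
        · exact Or.inl hs
        · exact Or.inr ⟨w, Or.inl rfl, h⟩
        · exact Or.inr ⟨w', Or.inr hw', hg⟩
      · rintro (hs | ⟨w', (rfl | hw'), hg⟩)
        · exact Or.inl (Or.inl hs)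
        · rw [h] at hg; exact Or.inl (Or.inr (Option.some_injective _ hg).symm)
        · exact Or.inr ⟨w', hw', hg⟩

-- what the index returns at an arbitrary key
set_option maxHeartbeats 1000000 in
theorem pv_get?_index (w : String) :
    pvKeywordToLabel.get? w =
      if w ∈ (["psychology", "mind", "behavior"] : List String) then some "Psychology and mental processes"
      else if w ∈ (["philosophy", "wisdom", "ethics"] : List String) then some "Philosophy and ethics"
      else if w ∈ (["art", "beauty", "creative"] : List String) then some "Art and creativity"
      else if w ∈ (["science", "nature", "discovery"] : List String) then some "Science and natural philosophy"
      else none := by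
  have hmk : pvKeywordToLabel = PySem.Dict.mk
    [("psychology", "Psychology and mental processes"),
     ("mind", "Psychology and mental processes"),
     ("behavior", "Psychology and mental processes"),
     ("philosophy", "Philosophy and ethics"),
     ("wisdom", "Philosophy and ethics"),
     ("ethics", "Philosophy and ethics"),
     ("art", "Art and creativity"),
     ("beauty", "Art and creativity"),
     ("creative", "Art and creativity"),
     ("science", "Science and natural philosophy"),
     ("nature", "Science and natural philosophy"),
     ("discovery", "Science and natural philosophy")] := by rfl
  rw [hmk]
  simp only [PySem.Dict.get?_mk_cons, List.mem_cons, List.not_mem_nil, or_false, beq_iff_eq]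
  split_ifs <;> first | rfl | (subst_vars; simp_all; done) | (rcases ‹_ ∨ _ ∨ _› with rfl | rfl | rfl <;> simp_all)

theorem pvB_hits_contains (tw : List String) (l : String) :
    PySem.Set.contains (pvB_hits tw) l =
      tw.any (fun w => pvKeywordToLabel.get? w == some l) := by
  unfold pvB_hits
  rw [Bool.eq_iff_iff]
  simp only [PySem.Set.contains_iff, pv_mem_hits_aux, List.any_eq_true, beq_iff_eq]
  constructor
  · rintro (h | ⟨w, hw, hg⟩)
    · simp [PySem.Set.empty] at h
    · exact ⟨w, hw, hg⟩
  · rintro ⟨w, hw, hg⟩; exact Or.inr ⟨w, hw, hg⟩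

-- A's per-group scan equals B's per-word index lookup, for a group with iff characterisation
theorem pv_cond_eq (tw kws : List String) (L : String)
    (h : ∀ w, pvKeywordToLabel.get? w = some L ↔ w ∈ kws) :
    kws.any (fun k => tw.contains k) = tw.any (fun w => pvKeywordToLabel.get? w == some L) := by
  rw [Bool.eq_iff_iff]
  simp only [List.any_eq_true, List.contains_iff_mem, h, beq_iff_eq]
  constructor
  · rintro ⟨k, hk, hmem⟩; exact ⟨k, hmem, hk⟩
  · rintro ⟨w, hw, hmem⟩; exact ⟨w, hmem, hw⟩

theorem pv_iff1 (w : String) :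
    pvKeywordToLabel.get? w = some "Psychology and mental processes" ↔
      w ∈ (["psychology", "mind", "behavior"] : List String) := by
  rw [pv_get?_index]
  constructor
  · intro hg; split_ifs at hg <;> simp_all
  · intro hw
    simp only [List.mem_cons, List.not_mem_nil, or_false] at hw
    rcases hw with rfl | rfl | rfl <;> decide

theorem pv_iff2 (w : String) :
    pvKeywordToLabel.get? w = some "Philosophy and ethics" ↔
      w ∈ (["philosophy", "wisdom", "ethics"] : List String) := by
  rw [pv_get?_index]
  constructor
  · intro hg; split_ifs at hg <;> simp_all
  · intro hw
    simp only [List.mem_cons, List.not_mem_nil, or_false] at hw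
    rcases hw with rfl | rfl | rfl <;> decide

theorem pv_iff3 (w : String) :
    pvKeywordToLabel.get? w = some "Art and creativity" ↔
      w ∈ (["art", "beauty", "creative"] : List String) := by
  rw [pv_get?_index]
  constructor
  · intro hg; split_ifs at hg <;> simp_all
  · intro hw
    simp only [List.mem_cons, List.not_mem_nil, or_false] at hw
    rcases hw with rfl | rfl | rfl <;> decide

theorem pv_iff4 (w : String) :
    pvKeywordToLabel.get? w = some "Science and natural philosophy" ↔
      w ∈ (["science", "nature", "discovery"] : List String) := by
  rw [pv_get?_index]
  constructor
  · intro hg; split_ifs at hg <;> simp_all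
  · intro hw
    simp only [List.mem_cons, List.not_mem_nil, or_false] at hw
    rcases hw with rfl | rfl | rfl <;> decide

theorem pv_theme_eq (d : List String) (tw : List String) :
    pvA_theme d tw = pvB_theme d tw := by
  unfold pvA_theme pvB_theme
  rw [pv_cond_eq tw _ _ pv_iff1, pv_cond_eq tw _ _ pv_iff2,
      pv_cond_eq tw _ _ pv_iff3, pv_cond_eq tw _ _ pv_iff4]
  simp only [pvThemeLabelOrder, List.filter, pvB_hits_contains]
  cases h1 : tw.any (fun w => pvKeywordToLabel.get? w == some "Psychology and mental processes") <;>
  cases h2 : tw.any (fun w => pvKeywordToLabel.get? w == some "Philosophy and ethics") <;>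
  cases h3 : tw.any (fun w => pvKeywordToLabel.get? w == some "Art and creativity") <;>
  cases h4 : tw.any (fun w => pvKeywordToLabel.get? w == some "Science and natural philosophy") <;>
    simp_all

theorem pv_author_eq (d : List String) (al : String) :
    pvA_author d al = pvB_author d al := by
  unfold pvA_author pvB_author
  simp only [pvAuthorKeywords, pvAuthorLabels]
  cases h1 : PySem.Str.isIn "freud" al <;>
  cases h2 : PySem.Str.isIn "shakespeare" al <;>
  cases h3 : PySem.Str.isIn "plato" al <;>
  cases h4 : PySem.Str.isIn "aristotle" al <;>
  cases h5 : PySem.Str.isIn "socrates" al <;>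
    simp_all [List.filter, PySem.List.min?, PySem.List.pyGet?, PySem.List.pyIdx?]

-- ===== VERDICT =====
theorem identify_knowledge_domains_py_spec : Claim_equal_identify_knowledge_domains_py := by
  intro themes author _
  unfold Spec_identify_knowledge_domains_py identify_knowledge_domains_py identify_knowledge_domains_py_alt
  cases themes <;> cases author <;>
    simp only [] <;>
    (try split_ifs) <;>
    simp [pv_theme_eq, pv_author_eq]
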